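-- pv_equiv track=rewrite | github.com/Lucien-MG/pycharon | src/utils.py | calculatechunk
-- ===== SOURCE A (Python) =====
-- def calculatechunk(filesize):
--     chunksizes = [4096, 8192, 16358, 32768, 65536, 131072]
--     size_test = 1000000
--     choice = 0
--
--     for i in range(len(chunksizes)):
--         if filesize / size_test > 1:
--             size_test *= 10
--             choice += 1
--         else:
--             break
--
--     return chunksizes[choice]
-- ===== SOURCE B (Python) =====
-- def calculatechunk(filesize):
--     chunksizes = [4096, 8192, 16358, 32768, 65536, 131072]
--     thresholds = [10**6, 10**7, 10**8, 10**9, 10**10, 10**11]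
--     # binary search: number of thresholds strictly below filesize (bisect_left)
--     lo, hi = 0, len(thresholds)
--     while lo < hi:
--         mid = (lo + hi) // 2
--         if thresholds[mid] < filesize:
--             lo = mid + 1
--         else:
--             hi = mid
--     return chunksizes[lo]
-- ===== Notes on version B (the rewrite author's own statement) =====
-- stated objective: idiomatic
-- what changed: Replaces A's linear scan with a tenfold-growing size_test by a bisect_left-style binary search over an explicit sorted threshold table, indexing the chunksize list by the resulting insertion point.
import Mathlib
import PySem

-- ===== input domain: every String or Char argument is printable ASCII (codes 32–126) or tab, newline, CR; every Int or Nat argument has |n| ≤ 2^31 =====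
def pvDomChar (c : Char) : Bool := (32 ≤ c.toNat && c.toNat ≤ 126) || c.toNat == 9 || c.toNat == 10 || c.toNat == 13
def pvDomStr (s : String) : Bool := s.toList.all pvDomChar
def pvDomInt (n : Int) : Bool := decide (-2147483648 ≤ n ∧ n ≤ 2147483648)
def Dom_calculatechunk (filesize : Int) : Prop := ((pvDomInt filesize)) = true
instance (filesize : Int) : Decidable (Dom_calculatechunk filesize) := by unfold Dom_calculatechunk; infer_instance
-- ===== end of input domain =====

-- B replaces A's linear scan over growing powers of ten by a hand-written
-- binary search (bisect_left) over an explicit threshold table (objective: idiomatic).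


-- ===== PORT A =====
-- Loop state: (size_test, choice, broken).  Python's 'filesize / size_test > 1'
-- is float true division; for |filesize| ≤ 2^31 and these powers of ten it is
-- exact and equivalent to 'filesize > size_test', which is how it is ported.
-- 'chunksizes[choice]' is ported with pyGetD; on the whole input domain
-- (|filesize| ≤ 2^31) choice ≤ 4, so the default is never reached.
def calculatechunk (filesize : Int) : Int :=
  let chunksizes : List Int := [4096, 8192, 16358, 32768, 65536, 131072]
  let st :=
    (PySem.List.pyRange 0 (chunksizes.length : Int) 1).foldl
      (fun (st : Int × Int × Bool) _ =>
        let (size_test, choice, broken) := st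
        if broken then st
        else if filesize > size_test then (size_test * 10, choice + 1, false)
        else (size_test, choice, true))
      (1000000, 0, false)
  PySem.List.pyGetD chunksizes st.2.1 0

-- ===== PORT B =====
-- hand-written bisect_left from Source B: thresholds[mid] via getD (mid < length always
-- holds when entered, the default is never reached)
def bisectLeft (thresholds : List Int) (x : Int) (lo hi : Nat) : Nat :=
  if lo < hi then
    let mid := (lo + hi) / 2
    if thresholds.getD mid 0 < x then bisectLeft thresholds x (mid + 1) hi
    else bisectLeft thresholds x lo mid
  else lo
termination_by hi - lo
decreasing_by all_goals omega

def calculatechunk_alt (filesize : Int) : Int :=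
  let chunksizes : List Int := [4096, 8192, 16358, 32768, 65536, 131072]
  let thresholds : List Int := [10^6, 10^7, 10^8, 10^9, 10^10, 10^11]
  PySem.List.pyGetD chunksizes
    ((bisectLeft thresholds filesize 0 thresholds.length : Nat) : Int) 0

-- ===== PRECONDITION & SPEC =====
def Spec_calculatechunk (filesize : Int) (out : Int) : Prop := out = calculatechunk_alt filesize
instance (filesize : Int) (out : Int) : Decidable (Spec_calculatechunk filesize out) := by unfold Spec_calculatechunk; infer_instance

-- ===== CLAIM (what is proved, stated in full; the proofs are below) =====
def Claim_equal_calculatechunk : Prop := ∀ (filesize : Int), Dom_calculatechunk filesize → Spec_calculatechunk filesize (calculatechunk filesize)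

-- ===== LEMMAS AND PROOFS =====

-- ===== VERDICT (by name: the statement is the Claim_ definition above) =====
theorem calculatechunk_spec : Claim_equal_calculatechunk := by
  intro filesize hdom
  unfold Dom_calculatechunk pvDomInt at hdom
  simp only [decide_eq_true_eq] at hdom
  unfold Spec_calculatechunk calculatechunk calculatechunk_alt
  have h5 : ¬ (10000000000:Int) < filesize := by omega
  have h6 : ¬ (100000000000:Int) < filesize := by omega
  by_cases h1 : (1000000:Int) < filesize
  · by_cases h2 : (10000000:Int) < filesize
    · by_cases h3 : (100000000:Int) < filesize
      · by_cases h4 : (1000000000:Int) < filesize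
        · simp [bisectLeft, PySem.List.pyRange, List.range_succ, PySem.List.pyGetD,
            PySem.List.pyGet?, PySem.List.pyIdx?, h1, h2, h3, h4, h5, h6]
        · simp [bisectLeft, PySem.List.pyRange, List.range_succ, PySem.List.pyGetD,
            PySem.List.pyGet?, PySem.List.pyIdx?, h1, h2, h3, h4]
      · have h4 : ¬ (1000000000:Int) < filesize := by omega
        simp [bisectLeft, PySem.List.pyRange, List.range_succ, PySem.List.pyGetD,
          PySem.List.pyGet?, PySem.List.pyIdx?, h1, h2, h3, h4]
    · have h3 : ¬ (100000000:Int) < filesize := by omega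
      have h4 : ¬ (1000000000:Int) < filesize := by omega
      simp [bisectLeft, PySem.List.pyRange, List.range_succ, PySem.List.pyGetD,
        PySem.List.pyGet?, PySem.List.pyIdx?, h1, h2, h4]
  · have h2 : ¬ (10000000:Int) < filesize := by omega
    have h3 : ¬ (100000000:Int) < filesize := by omega
    have h4 : ¬ (1000000000:Int) < filesize := by omega
    simp [bisectLeft, PySem.List.pyRange, List.range_succ, PySem.List.pyGetD,
      PySem.List.pyGet?, PySem.List.pyIdx?, h1, h2, h4]
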